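-- pv_equiv track=rewrite | github.com/phsria0825/Q_length_v2 | tlops-DT/tlops/gendata/SignalState.py | find_change_phases
-- ===== SOURCE A (Python) =====
-- def find_change_phases(cur_phase, next_phase):
--     switch_reds = []
--     switch_greens = []
--     for i, (p0, p1) in enumerate(zip(cur_phase, next_phase)):
--         if (p0 in 'Gg') and (p1 == 'r'):
--             switch_reds.append(i)
--         elif (p0 in 'r') and (p1 in 'Gg'):
--             switch_greens.append(i)
--     yellow_phase = list(cur_phase)
--     for i in switch_reds:
--         yellow_phase[i] = 'y'
--     for i in switch_greens:
--         yellow_phase[i] = 'r'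
--     return ''.join(yellow_phase)
-- ===== SOURCE B (Python) =====
-- def find_change_phases(cur_phase, next_phase):
--     # One direct-emit pass: a position turns 'y' exactly when it goes green->red;
--     # the green->red-to-green case writes 'r' onto an 'r', i.e. is a no-op.
--     return ''.join('y' if p0 in 'Gg' and p1 == 'r' else p0
--                    for p0, p1 in zip(cur_phase, next_phase)) + cur_phase[len(next_phase):]
-- ===== Notes on version B (the rewrite author's own statement) =====
-- stated objective: simpler
-- what changed: Replaces A's collect-switch-indices-then-two-reapply-passes with a single direct-emit pass over zip (noting that A's green pass rewrites 'r' onto an 'r' and is a no-op) plus the untouched tail of cur_phase.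
import Mathlib
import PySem

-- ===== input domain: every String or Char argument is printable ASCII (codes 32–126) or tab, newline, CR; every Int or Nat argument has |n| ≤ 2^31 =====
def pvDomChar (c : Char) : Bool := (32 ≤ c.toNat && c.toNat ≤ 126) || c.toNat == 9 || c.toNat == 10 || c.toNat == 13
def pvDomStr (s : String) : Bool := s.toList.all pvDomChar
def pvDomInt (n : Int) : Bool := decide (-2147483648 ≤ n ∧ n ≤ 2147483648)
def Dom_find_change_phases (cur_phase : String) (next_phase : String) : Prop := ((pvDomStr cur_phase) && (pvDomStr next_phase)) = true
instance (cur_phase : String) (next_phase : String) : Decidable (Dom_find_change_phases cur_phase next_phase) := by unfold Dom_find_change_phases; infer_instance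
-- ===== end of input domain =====

-- B is simpler: one direct-emit pass over zip(cur,next) plus cur's untouched tail,
-- instead of A's collect-switch-indices-then-two-reapply-passes (A's green pass writes 'r' onto an 'r').

-- ===== PORT A =====
-- the enumerate-zip loop with its two accumulator lists, then the two index-reapply passes
def find_change_phases (cur_phase : String) (next_phase : String) : String :=
  let pairs := PySem.List.enumerate (List.zip cur_phase.toList next_phase.toList) 0
  let rg := pairs.foldl
    (fun (acc : List Int × List Int) ip =>
      if (ip.2.1 = 'G' ∨ ip.2.1 = 'g') ∧ ip.2.2 = 'r' then (acc.1 ++ [ip.1], acc.2)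
      else if ip.2.1 = 'r' ∧ (ip.2.2 = 'G' ∨ ip.2.2 = 'g') then (acc.1, acc.2 ++ [ip.1])
      else acc) ([], [])
  let yellow0 := cur_phase.toList
  let yellow1 := rg.1.foldl (fun ys i => PySem.List.pySetD ys i 'y') yellow0
  let yellow2 := rg.2.foldl (fun ys i => PySem.List.pySetD ys i 'r') yellow1
  String.mk yellow2

-- ===== PORT B =====
def find_change_phases_alt (cur_phase : String) (next_phase : String) : String :=
  let c := cur_phase.toList
  let n := next_phase.toList
  String.mk
    (((List.zip c n).map (fun p => if (p.1 = 'G' ∨ p.1 = 'g') ∧ p.2 = 'r' then 'y' else p.1))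
      ++ c.drop n.length)

-- ===== PRECONDITION & SPEC =====
def Spec_find_change_phases (cur_phase : String) (next_phase : String) (out : String) : Prop := out = find_change_phases_alt cur_phase next_phase
instance (cur_phase : String) (next_phase : String) (out : String) : Decidable (Spec_find_change_phases cur_phase next_phase out) := by unfold Spec_find_change_phases; infer_instance

-- ===== CLAIM (what is proved, stated in full; the proofs are below) =====
def Claim_equal_find_change_phases : Prop := ∀ (cur_phase : String) (next_phase : String), Dom_find_change_phases cur_phase next_phase → Spec_find_change_phases cur_phase next_phase (find_change_phases cur_phase next_phase)

-- ===== LEMMAS AND PROOFS =====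

-- the two switch conditions of the loop, as predicates on a (cur-char, next-char) pair
def fcpRed (p : Char × Char) : Bool := decide ((p.1 = 'G' ∨ p.1 = 'g') ∧ p.2 = 'r')
def fcpGreen (p : Char × Char) : Bool :=
  decide (¬((p.1 = 'G' ∨ p.1 = 'g') ∧ p.2 = 'r') ∧ p.1 = 'r' ∧ (p.2 = 'G' ∨ p.2 = 'g'))

-- A's collection fold appends the filtered switch indices to both accumulators.
theorem fcp_fold_rg (ps : List (Char × Char)) (s : Int) (r g : List Int) :
    (PySem.List.enumerate ps s).foldl
      (fun (acc : List Int × List Int) ip =>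
        if (ip.2.1 = 'G' ∨ ip.2.1 = 'g') ∧ ip.2.2 = 'r' then (acc.1 ++ [ip.1], acc.2)
        else if ip.2.1 = 'r' ∧ (ip.2.2 = 'G' ∨ ip.2.2 = 'g') then (acc.1, acc.2 ++ [ip.1])
        else acc) (r, g)
    = (r ++ ((PySem.List.enumerate ps s).filter (fun ip => fcpRed ip.2)).map (·.1),
       g ++ ((PySem.List.enumerate ps s).filter (fun ip => fcpGreen ip.2)).map (·.1)) := by
  induction ps generalizing s r g with
  | nil => simp [PySem.List.enumerate_nil]
  | cons p ps ih =>
      rw [PySem.List.enumerate_cons]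
      by_cases h1 : (p.1 = 'G' ∨ p.1 = 'g') ∧ p.2 = 'r'
      · simp [List.foldl_cons, fcpRed, fcpGreen, h1, ih]
      · by_cases h2 : p.1 = 'r' ∧ (p.2 = 'G' ∨ p.2 = 'g')
        · simp [List.foldl_cons, fcpRed, fcpGreen, h2, ih]
        · simp [List.foldl_cons, fcpRed, fcpGreen, h1, h2, ih]

theorem fcp_foldl_set_length (is : List Int) (v : Char) (ys : List Char) :
    (is.foldl (fun ys i => PySem.List.pySetD ys i v) ys).length = ys.length := by
  induction is generalizing ys with
  | nil => rfl
  | cons a as ih => simp [List.foldl_cons, ih, PySem.List.length_pySetD]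

-- value at position j after a foldl of in-place writes of the constant v
theorem fcp_foldl_set_get (is : List Int) (v : Char) (ys : List Char) (j : Nat)
    (hj : j < ys.length) (hnn : ∀ i ∈ is, 0 ≤ i) :
    (is.foldl (fun ys i => PySem.List.pySetD ys i v) ys)[j]?
    = some (if (j : Int) ∈ is then v else ys[j]) := by
  induction is generalizing ys with
  | nil => simp [hj]
  | cons a as ih =>
      have ha : 0 ≤ a := hnn a (List.mem_cons_self ..)
      have has : ∀ i ∈ as, 0 ≤ i := fun i hi => hnn i (List.mem_cons_of_mem _ hi)
      rw [List.foldl_cons, PySem.List.pySetD_of_nonneg _ _ ha,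
        ih (ys.set a.toNat v) (by simpa using hj) has]
      by_cases hja : (j : Int) = a
      · have hja' : a.toNat = j := by omega
        simp [hja, hja']
      · have hja' : a.toNat ≠ j := by omega
        simp [List.mem_cons, hja, hja']

-- membership of a Nat index in the filtered-index list
theorem fcp_mem_filter_map (ps : List (Char × Char)) (P : Char × Char → Bool) (j : Nat) :
    ((j : Int) ∈ ((PySem.List.enumerate ps 0).filter (fun ip => P ip.2)).map (·.1))
      ↔ ∃ h : j < ps.length, P ps[j] := by
  constructor
  · rintro hm
    rcases List.mem_map.1 hm with ⟨ip, hip, hfst⟩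
    rcases List.mem_filter.1 hip with ⟨hmem, hP⟩
    rcases (PySem.List.mem_enumerate_iff _ _ _).1 hmem with ⟨k, hk, rfl⟩
    have : k = j := by simpa using hfst
    subst this
    exact ⟨hk, by simpa using hP⟩
  · rintro ⟨h, hP⟩
    refine List.mem_map.2 ⟨((j : Int), ps[j]), List.mem_filter.2 ⟨?_, by simpa using hP⟩, rfl⟩
    exact (PySem.List.mem_enumerate_iff _ _ _).2 ⟨j, h, by simp⟩

theorem fcp_filter_map_nonneg (ps : List (Char × Char)) (P : Char × Char → Bool) :
    ∀ i ∈ ((PySem.List.enumerate ps 0).filter (fun ip => P ip.2)).map (·.1), 0 ≤ i := by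
  intro i hi
  rcases List.mem_map.1 hi with ⟨ip, hip, rfl⟩
  rcases (PySem.List.mem_enumerate_iff _ _ _).1 (List.mem_filter.1 hip).1 with ⟨k, hk, rfl⟩
  simp

-- ===== VERDICT (by name: the statement is the Claim_ definition above) =====
theorem find_change_phases_spec : Claim_equal_find_change_phases := by
  intro cur next _
  unfold Spec_find_change_phases find_change_phases find_change_phases_alt
  simp only []
  set cs := cur.toList with hcs
  set ns := next.toList with hns
  set ps := List.zip cs ns with hps
  rw [fcp_fold_rg]
  simp only [List.nil_append]
  set reds := ((PySem.List.enumerate ps 0).filter (fun ip => fcpRed ip.2)).map (·.1) with hreds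
  set greens := ((PySem.List.enumerate ps 0).filter (fun ip => fcpGreen ip.2)).map (·.1) with hgreens
  apply congrArg String.mk
  have hpslen : ps.length = min cs.length ns.length := by simp [hps]
  have hlen1 : (reds.foldl (fun ys i => PySem.List.pySetD ys i 'y') cs).length = cs.length :=
    fcp_foldl_set_length ..
  apply List.ext_getElem?
  intro j
  by_cases hjc : j < cs.length
  · rw [fcp_foldl_set_get _ _ _ _ (by omega) (hgreens ▸ fcp_filter_map_nonneg ps fcpGreen)]
    have hred := fcp_foldl_set_get reds 'y' cs j hjc (hreds ▸ fcp_filter_map_nonneg ps fcpRed)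
    rw [List.getElem?_eq_getElem (by omega)] at hred
    have hred' := Option.some.inj hred
    rw [hred']
    rw [hgreens, hreds]
    simp only [fcp_mem_filter_map]
    by_cases hjp : j < ps.length
    · have hjn : j < ns.length := by omega
      have hjz : j < (ps.map (fun p => if (p.1 = 'G' ∨ p.1 = 'g') ∧ p.2 = 'r' then 'y' else p.1)).length := by
        simpa using hjp
      rw [List.getElem?_append_left hjz, List.getElem?_eq_getElem hjz, List.getElem_map]
      have hget : ps[j] = (cs[j], ns[j]) := by simp [hps, List.getElem_zip]
      by_cases h1 : (cs[j] = 'G' ∨ cs[j] = 'g') ∧ ns[j] = 'r'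
      · simp [fcpRed, fcpGreen, hget, h1, hjp]
      · by_cases h2 : cs[j] = 'r' ∧ (ns[j] = 'G' ∨ ns[j] = 'g')
        · -- the green switch writes 'r' onto cs[j], which is already 'r'
          simp only [fcpRed, fcpGreen, hget]
          simp [h2, hjp]
        · simp [fcpRed, fcpGreen, hget, h1, h2, hjp]
    · have h1 : ¬ ∃ h : j < ps.length, fcpRed ps[j] = true := by rintro ⟨h, _⟩; exact hjp h
      have h2 : ¬ ∃ h : j < ps.length, fcpGreen ps[j] = true := by rintro ⟨h, _⟩; exact hjp h
      rw [if_neg h2, if_neg h1]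
      have hjge : (ps.map (fun p => if (p.1 = 'G' ∨ p.1 = 'g') ∧ p.2 = 'r' then 'y' else p.1)).length ≤ j := by
        simpa using (by omega : ps.length ≤ j)
      rw [List.getElem?_append_right hjge]
      have hjd : j - (ps.map (fun p => if (p.1 = 'G' ∨ p.1 = 'g') ∧ p.2 = 'r' then 'y' else p.1)).length < (cs.drop ns.length).length := by
        simp only [List.length_map, List.length_drop]
        omega
      rw [List.getElem?_eq_getElem hjd, List.getElem_drop]
      rw [hpslen] at hjp
      simp only [List.length_map, hpslen]
      have hidx : ns.length + (j - min cs.length ns.length) = j := by omega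
      simp only [hidx]
  · rw [List.getElem?_eq_none, List.getElem?_eq_none]
    · simp only [List.length_append, List.length_map, List.length_drop, hpslen]
      omega
    · rw [fcp_foldl_set_length, hlen1]
      omega
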